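-- pv_equiv track=rewrite | github.com/elgerytme/Pynomaly | scripts/best_practices_framework/validators/security/secrets_validator.py | _has_sequential_pattern
-- ===== SOURCE A (Python) =====
-- def _has_sequential_pattern(value: str) -> bool:
--     """Check if value has obvious sequential patterns"""
--     # Check for alphabetical sequences
--     if len(value) >= 4:
--         for i in range(len(value) - 3):
--             substring = value[i:i+4].lower()
--             if substring in 'abcdefghijklmnopqrstuvwxyz':
--                 return True
--
--     # Check for numerical sequences
--     if len(value) >= 3:
--         for i in range(len(value) - 2):
--             substring = value[i:i+3]
--             if substring.isdigit() and substring in '0123456789':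
--                 return True
--
--     return False
-- ===== SOURCE B (Python) =====
-- def _has_sequential_pattern(value: str) -> bool:
--     """Single pass keeping run lengths of ascending letters/digits."""
--     alpha_run = 0
--     digit_run = 0
--     prev = ''
--     for ch in value:
--         c = ch.lower()
--         if 'a' <= c <= 'z':
--             if prev and 'a' <= prev <= 'z' and ord(c) == ord(prev) + 1:
--                 alpha_run += 1
--             else:
--                 alpha_run = 1
--         else:
--             alpha_run = 0
--         if '0' <= c <= '9':
--             if prev and '0' <= prev <= '9' and ord(c) == ord(prev) + 1:
--                 digit_run += 1
--             else:
--                 digit_run = 1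
--         else:
--             digit_run = 0
--         if alpha_run >= 4 or digit_run >= 3:
--             return True
--         prev = c
--     return False
-- ===== Notes on version B (the rewrite author's own statement) =====
-- stated objective: simpler
-- what changed: A tests every fixed-size window for substring membership in the constant alphabet/digit strings (plus a redundant isdigit pass); B makes one linear pass keeping two run-length counters (current ascending-consecutive letter run and digit run) and returns True as soon as a run reaches 4 letters or 3 digits.
import Mathlib
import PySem

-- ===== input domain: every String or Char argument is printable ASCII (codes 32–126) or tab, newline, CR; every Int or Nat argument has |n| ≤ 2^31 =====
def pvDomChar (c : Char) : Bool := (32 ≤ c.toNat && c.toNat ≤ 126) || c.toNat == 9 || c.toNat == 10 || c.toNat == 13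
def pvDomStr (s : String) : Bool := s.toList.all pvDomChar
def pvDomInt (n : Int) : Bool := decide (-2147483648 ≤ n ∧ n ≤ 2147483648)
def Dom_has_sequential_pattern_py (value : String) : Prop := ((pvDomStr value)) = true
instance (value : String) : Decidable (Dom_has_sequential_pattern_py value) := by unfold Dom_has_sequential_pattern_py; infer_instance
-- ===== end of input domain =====

-- B replaces A's per-window substring searches by a single pass with two run-length counters (objective: simpler).

-- ===== PORT A =====
def pvAlphaS : List Char :=
  ['a','b','c','d','e','f','g','h','i','j','k','l','m','n','o','p','q','r','s','t','u','v','w','x','y','z']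

def pvDigitS : List Char := ['0','1','2','3','4','5','6','7','8','9']

-- first loop of A: lowercased 4-windows tested as substrings of the alphabet
def pvAAlphaHit (s : List Char) : Bool :=
  if 4 ≤ s.length then
    (PySem.List.pyRange 0 ((s.length : Int) - 3) 1).any fun i =>
      PySem.Chars.isIn (PySem.Chars.lower (PySem.Chars.slice s (some i) (some (i + 4)))) pvAlphaS
  else false

-- second loop of A: 3-windows tested with isdigit and as substrings of the digit string
def pvADigitHit (s : List Char) : Bool :=
  if 3 ≤ s.length then
    (PySem.List.pyRange 0 ((s.length : Int) - 2) 1).any fun i =>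
      PySem.Chars.strIsdigit (PySem.Chars.slice s (some i) (some (i + 3))) &&
      PySem.Chars.isIn (PySem.Chars.slice s (some i) (some (i + 3))) pvDigitS
  else false

def has_sequential_pattern_py (value : String) : Bool :=
  if pvAAlphaHit value.toList then true else pvADigitHit value.toList

-- ===== PORT B =====
-- one pass over the characters, keeping the current ascending-letter and ascending-digit run lengths
def pvBLoop : List Char → Nat → Nat → Option Char → Bool
  | [], _, _, _ => false
  | ch :: rest, alphaRun, digitRun, prev =>
    let c := PySem.Chars.lowerChar ch
    let alphaRun' : Nat :=
      if 'a' ≤ c ∧ c ≤ 'z' then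
        match prev with
        | some p => if ('a' ≤ p ∧ p ≤ 'z') ∧ c.toNat = p.toNat + 1 then alphaRun + 1 else 1
        | none => 1
      else 0
    let digitRun' : Nat :=
      if '0' ≤ c ∧ c ≤ '9' then
        match prev with
        | some p => if ('0' ≤ p ∧ p ≤ '9') ∧ c.toNat = p.toNat + 1 then digitRun + 1 else 1
        | none => 1
      else 0
    if 4 ≤ alphaRun' ∨ 3 ≤ digitRun' then true
    else pvBLoop rest alphaRun' digitRun' (some c)

def has_sequential_pattern_py_alt (value : String) : Bool :=
  pvBLoop value.toList 0 0 none

-- ===== PRECONDITION & SPEC =====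
def Spec_has_sequential_pattern_py (value : String) (out : Bool) : Prop := out = has_sequential_pattern_py_alt value
instance (value : String) (out : Bool) : Decidable (Spec_has_sequential_pattern_py value out) := by unfold Spec_has_sequential_pattern_py; infer_instance

-- ===== CLAIM (what is proved, stated in full; the proofs are below) =====
def Claim_equal_has_sequential_pattern_py : Prop := ∀ (value : String), Dom_has_sequential_pattern_py value → Spec_has_sequential_pattern_py value (has_sequential_pattern_py value)

-- ===== LEMMAS AND PROOFS =====

-- Char arithmetic bridges
lemma pvChar_le_iff (a b : Char) : a ≤ b ↔ a.toNat ≤ b.toNat := by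
  rw [Char.le_def, UInt32.le_iff_toNat_le]
  exact Iff.rfl

lemma pvValid (n : Nat) (h : n < 55296) : (Char.ofNat n).toNat = n := by
  rw [Char.toNat_ofNat, if_pos (Or.inl h)]

lemma pvCondL (c : Char) : ('a' ≤ c ∧ c ≤ 'z') ↔ (97 ≤ c.toNat ∧ c.toNat ≤ 122) := by
  rw [pvChar_le_iff, pvChar_le_iff,
    show ('a' : Char).toNat = 97 from by decide, show ('z' : Char).toNat = 122 from by decide]

lemma pvCondD (c : Char) : ('0' ≤ c ∧ c ≤ '9') ↔ (48 ≤ c.toNat ∧ c.toNat ≤ 57) := by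
  rw [pvChar_le_iff, pvChar_le_iff,
    show ('0' : Char).toNat = 48 from by decide, show ('9' : Char).toNat = 57 from by decide]

lemma pvLower_toNat (c : Char) :
    (PySem.Chars.lowerChar c).toNat =
      if 65 ≤ c.toNat ∧ c.toNat ≤ 90 then c.toNat + 32 else c.toNat := by
  have hA : ('A' : Char).toNat = 65 := by decide
  have hZ : ('Z' : Char).toNat = 90 := by decide
  by_cases h : 65 ≤ c.toNat ∧ c.toNat ≤ 90
  · have hu : PySem.Chars.isupper c = true := by
      simp only [PySem.Chars.isupper, Bool.and_eq_true, decide_eq_true_iff, pvChar_le_iff, hA, hZ]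
      omega
    simp only [PySem.Chars.lowerChar]
    rw [if_pos hu, if_pos h]
    exact pvValid _ (by omega)
  · have hu : PySem.Chars.isupper c = false := by
      cases h' : PySem.Chars.isupper c
      · rfl
      · exfalso
        simp only [PySem.Chars.isupper, Bool.and_eq_true, decide_eq_true_iff, pvChar_le_iff,
          hA, hZ] at h'
        omega
    simp only [PySem.Chars.lowerChar]
    rw [if_neg (by simp [hu]), if_neg h]

-- window predicates (proof-side specification)
def pvG4 (a b c d : Char) : Bool :=
  decide (97 ≤ a.toNat ∧ b.toNat = a.toNat + 1 ∧ c.toNat = b.toNat + 1 ∧ d.toNat = c.toNat + 1 ∧ d.toNat ≤ 122)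

def pvG3 (a b c : Char) : Bool :=
  decide (48 ≤ a.toNat ∧ b.toNat = a.toNat + 1 ∧ c.toNat = b.toNat + 1 ∧ c.toNat ≤ 57)

def pvWin4 (t : List Char) (a : Char) : Bool :=
  match t with
  | b :: c :: d :: _ => pvG4 a b c d
  | _ => false

def pvWin3 (t : List Char) (a : Char) : Bool :=
  match t with
  | b :: c :: _ => pvG3 a b c
  | _ => false

def pvScan4 : List Char → Bool
  | [] => false
  | a :: t => pvWin4 t a || pvScan4 t

def pvScan3 : List Char → Bool
  | [] => false
  | a :: t => pvWin3 t a || pvScan3 t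

lemma pvG4_false {a b c d : Char}
    (h : ¬(97 ≤ a.toNat ∧ b.toNat = a.toNat + 1 ∧ c.toNat = b.toNat + 1 ∧ d.toNat = c.toNat + 1 ∧ d.toNat ≤ 122)) :
    pvG4 a b c d = false := by unfold pvG4; exact decide_eq_false h

lemma pvG4_true {a b c d : Char}
    (h : 97 ≤ a.toNat ∧ b.toNat = a.toNat + 1 ∧ c.toNat = b.toNat + 1 ∧ d.toNat = c.toNat + 1 ∧ d.toNat ≤ 122) :
    pvG4 a b c d = true := by unfold pvG4; exact decide_eq_true h

lemma pvG3_false {a b c : Char}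
    (h : ¬(48 ≤ a.toNat ∧ b.toNat = a.toNat + 1 ∧ c.toNat = b.toNat + 1 ∧ c.toNat ≤ 57)) :
    pvG3 a b c = false := by unfold pvG3; exact decide_eq_false h

lemma pvG3_true {a b c : Char}
    (h : 48 ≤ a.toNat ∧ b.toNat = a.toNat + 1 ∧ c.toNat = b.toNat + 1 ∧ c.toNat ≤ 57) :
    pvG3 a b c = true := by unfold pvG3; exact decide_eq_true h

lemma pvScan4_short (l : List Char) (h : l.length ≤ 3) : pvScan4 l = false := by
  rcases l with _|⟨a,_|⟨b,_|⟨c,_|⟨d,t⟩⟩⟩⟩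
  · rfl
  · rfl
  · rfl
  · rfl
  · exfalso; simp only [List.length_cons] at h; omega

lemma pvScan3_short (l : List Char) (h : l.length ≤ 2) : pvScan3 l = false := by
  rcases l with _|⟨a,_|⟨b,_|⟨c,t⟩⟩⟩
  · rfl
  · rfl
  · rfl
  · exfalso; simp only [List.length_cons] at h; omega

lemma pvScan4_iff (l : List Char) :
    pvScan4 l = true ↔ ∃ j a b c d t, l.drop j = a :: b :: c :: d :: t ∧ pvG4 a b c d = true := by
  induction l with
  | nil => simp [pvScan4]
  | cons x l IH =>
    simp only [pvScan4, Bool.or_eq_true, IH]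
    constructor
    · rintro (hw | ⟨j, a, b, c, d, t, hdrop, hg⟩)
      · rcases l with _|⟨b,_|⟨c,_|⟨d,t⟩⟩⟩
        · simp [pvWin4] at hw
        · simp [pvWin4] at hw
        · simp [pvWin4] at hw
        · exact ⟨0, x, b, c, d, t, rfl, hw⟩
      · exact ⟨j+1, a, b, c, d, t, by rw [List.drop_succ_cons]; exact hdrop, hg⟩
    · rintro ⟨j, a, b, c, d, t, hdrop, hg⟩
      cases j with
      | zero =>
        rw [List.drop_zero] at hdrop
        injection hdrop with h1 h2
        subst h1; subst h2
        exact Or.inl hg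
      | succ j =>
        rw [List.drop_succ_cons] at hdrop
        exact Or.inr ⟨j, a, b, c, d, t, hdrop, hg⟩

lemma pvScan3_iff (l : List Char) :
    pvScan3 l = true ↔ ∃ j a b c t, l.drop j = a :: b :: c :: t ∧ pvG3 a b c = true := by
  induction l with
  | nil => simp [pvScan3]
  | cons x l IH =>
    simp only [pvScan3, Bool.or_eq_true, IH]
    constructor
    · rintro (hw | ⟨j, a, b, c, t, hdrop, hg⟩)
      · rcases l with _|⟨b,_|⟨c,t⟩⟩
        · simp [pvWin3] at hw
        · simp [pvWin3] at hw
        · exact ⟨0, x, b, c, t, rfl, hw⟩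
      · exact ⟨j+1, a, b, c, t, by rw [List.drop_succ_cons]; exact hdrop, hg⟩
    · rintro ⟨j, a, b, c, t, hdrop, hg⟩
      cases j with
      | zero =>
        rw [List.drop_zero] at hdrop
        injection hdrop with h1 h2
        subst h1; subst h2
        exact Or.inl hg
      | succ j =>
        rw [List.drop_succ_cons] at hdrop
        exact Or.inr ⟨j, a, b, c, t, hdrop, hg⟩

-- dropping a prefix that cannot take part in any window
lemma pvScan4_skip1 (c : Char) (L : List Char) (hc : ¬(97 ≤ c.toNat ∧ c.toNat ≤ 122)) :
    pvScan4 (c :: L) = pvScan4 L := by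
  have hw : pvWin4 L c = false := by
    rcases L with _|⟨b,_|⟨d,_|⟨e,t⟩⟩⟩
    · rfl
    · rfl
    · rfl
    · exact pvG4_false (by rintro ⟨u1,u2,u3,u4,u5⟩; exact hc ⟨u1, by omega⟩)
  show (pvWin4 L c || pvScan4 L) = pvScan4 L
  rw [hw, Bool.false_or]

lemma pvScan3_skip1 (c : Char) (L : List Char) (hc : ¬(48 ≤ c.toNat ∧ c.toNat ≤ 57)) :
    pvScan3 (c :: L) = pvScan3 L := by
  have hw : pvWin3 L c = false := by
    rcases L with _|⟨b,_|⟨d,t⟩⟩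
    · rfl
    · rfl
    · exact pvG3_false (by rintro ⟨u1,u2,u3,u4⟩; exact hc ⟨u1, by omega⟩)
  show (pvWin3 L c || pvScan3 L) = pvScan3 L
  rw [hw, Bool.false_or]

lemma pvScan4_skip (xs : List Char) (c : Char) (L : List Char)
    (hc : ¬(97 ≤ c.toNat ∧ c.toNat ≤ 122)) :
    xs.length ≤ 3 → pvScan4 (xs ++ c :: L) = pvScan4 L := by
  induction xs with
  | nil => intro _; exact pvScan4_skip1 c L hc
  | cons x xs IH =>
    intro hlen
    have hlen' : xs.length ≤ 3 := by simp only [List.length_cons] at hlen; omega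
    have hw : pvWin4 (xs ++ c :: L) x = false := by
      rcases xs with _|⟨y,_|⟨z,t⟩⟩
      · rcases L with _|⟨l0,_|⟨l1,L'⟩⟩
        · rfl
        · rfl
        · exact pvG4_false (by rintro ⟨u1,u2,u3,u4,u5⟩; exact hc ⟨by omega, by omega⟩)
      · rcases L with _|⟨l0,L'⟩
        · rfl
        · exact pvG4_false (by rintro ⟨u1,u2,u3,u4,u5⟩; exact hc ⟨by omega, by omega⟩)
      · rcases t with _|⟨w,t'⟩
        · exact pvG4_false (by rintro ⟨u1,u2,u3,u4,u5⟩; exact hc ⟨by omega, u5⟩)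
        · exfalso; simp only [List.length_cons] at hlen; omega
    rw [List.cons_append]
    show (pvWin4 (xs ++ c :: L) x || pvScan4 (xs ++ c :: L)) = pvScan4 L
    rw [hw, Bool.false_or]
    exact IH hlen'

lemma pvScan3_skip (xs : List Char) (c : Char) (L : List Char)
    (hc : ¬(48 ≤ c.toNat ∧ c.toNat ≤ 57)) :
    xs.length ≤ 2 → pvScan3 (xs ++ c :: L) = pvScan3 L := by
  induction xs with
  | nil => intro _; exact pvScan3_skip1 c L hc
  | cons x xs IH =>
    intro hlen
    have hlen' : xs.length ≤ 2 := by simp only [List.length_cons] at hlen; omega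
    have hw : pvWin3 (xs ++ c :: L) x = false := by
      rcases xs with _|⟨y,t⟩
      · rcases L with _|⟨l0,L'⟩
        · rfl
        · exact pvG3_false (by rintro ⟨u1,u2,u3,u4⟩; exact hc ⟨by omega, by omega⟩)
      · rcases t with _|⟨w,t'⟩
        · exact pvG3_false (by rintro ⟨u1,u2,u3,u4⟩; exact hc ⟨by omega, u4⟩)
        · exfalso; simp only [List.length_cons] at hlen; omega
    rw [List.cons_append]
    show (pvWin3 (xs ++ c :: L) x || pvScan3 (xs ++ c :: L)) = pvScan3 L
    rw [hw, Bool.false_or]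
    exact IH hlen'

-- dropping an ascending prefix that the next character does not continue
lemma pvScan4_break (xs : List Char) (c : Char) (L : List Char) :
    (∀ p, xs.getLast? = some p → c.toNat ≠ p.toNat + 1) →
    xs.length ≤ 3 → pvScan4 (xs ++ c :: L) = pvScan4 (c :: L) := by
  induction xs with
  | nil => intro _ _; rfl
  | cons x xs IH =>
    intro hb hlen
    have hlen' : xs.length ≤ 3 := by simp only [List.length_cons] at hlen; omega
    have hb' : ∀ p, xs.getLast? = some p → c.toNat ≠ p.toNat + 1 := by
      intro p hp
      rcases xs with _|⟨y,ys⟩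
      · simp at hp
      · exact hb p (by rw [List.getLast?_cons_cons]; exact hp)
    have hw : pvWin4 (xs ++ c :: L) x = false := by
      rcases xs with _|⟨y,_|⟨z,t⟩⟩
      · have hbx := hb x (by simp)
        rcases L with _|⟨l0,_|⟨l1,L'⟩⟩
        · rfl
        · rfl
        · exact pvG4_false (by rintro ⟨u1,u2,u3,u4,u5⟩; exact hbx u2)
      · have hby := hb y (by simp)
        rcases L with _|⟨l0,L'⟩
        · rfl
        · exact pvG4_false (by rintro ⟨u1,u2,u3,u4,u5⟩; exact hby u3)
      · rcases t with _|⟨w,t'⟩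
        · have hbz := hb z (by simp)
          exact pvG4_false (by rintro ⟨u1,u2,u3,u4,u5⟩; exact hbz u4)
        · exfalso; simp only [List.length_cons] at hlen; omega
    rw [List.cons_append]
    show (pvWin4 (xs ++ c :: L) x || pvScan4 (xs ++ c :: L)) = pvScan4 (c :: L)
    rw [hw, Bool.false_or]
    exact IH hb' hlen'

lemma pvScan3_break (xs : List Char) (c : Char) (L : List Char) :
    (∀ p, xs.getLast? = some p → c.toNat ≠ p.toNat + 1) →
    xs.length ≤ 2 → pvScan3 (xs ++ c :: L) = pvScan3 (c :: L) := by
  induction xs with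
  | nil => intro _ _; rfl
  | cons x xs IH =>
    intro hb hlen
    have hlen' : xs.length ≤ 2 := by simp only [List.length_cons] at hlen; omega
    have hb' : ∀ p, xs.getLast? = some p → c.toNat ≠ p.toNat + 1 := by
      intro p hp
      rcases xs with _|⟨y,ys⟩
      · simp at hp
      · exact hb p (by rw [List.getLast?_cons_cons]; exact hp)
    have hw : pvWin3 (xs ++ c :: L) x = false := by
      rcases xs with _|⟨y,t⟩
      · have hbx := hb x (by simp)
        rcases L with _|⟨l0,L'⟩
        · rfl
        · exact pvG3_false (by rintro ⟨u1,u2,u3,u4⟩; exact hbx u2)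
      · rcases t with _|⟨w,t'⟩
        · have hby := hb y (by simp)
          exact pvG3_false (by rintro ⟨u1,u2,u3,u4⟩; exact hby u3)
        · exfalso; simp only [List.length_cons] at hlen; omega
    rw [List.cons_append]
    show (pvWin3 (xs ++ c :: L) x || pvScan3 (xs ++ c :: L)) = pvScan3 (c :: L)
    rw [hw, Bool.false_or]
    exact IH hb' hlen'

lemma pvScan4_fire (x y z c : Char) (L : List Char) (h : pvG4 x y z c = true) :
    pvScan4 (x :: y :: z :: c :: L) = true := by
  show (pvWin4 (y :: z :: c :: L) x || pvScan4 (y :: z :: c :: L)) = true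
  rw [show pvWin4 (y :: z :: c :: L) x = pvG4 x y z c from rfl, h, Bool.true_or]

lemma pvScan3_fire (x y c : Char) (L : List Char) (h : pvG3 x y c = true) :
    pvScan3 (x :: y :: c :: L) = true := by
  show (pvWin3 (y :: c :: L) x || pvScan3 (y :: c :: L)) = true
  rw [show pvWin3 (y :: c :: L) x = pvG3 x y c from rfl, h, Bool.true_or]

-- ascending-run bookkeeping for B's invariant
def pvAscB : List Char → Bool
  | a :: t => (match t with | b :: _ => b.toNat == a.toNat + 1 | [] => true) && pvAscB t
  | [] => true

lemma pvAscB_cons_cons (a b : Char) (t : List Char) :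
    pvAscB (a :: b :: t) = ((b.toNat == a.toNat + 1) && pvAscB (b :: t)) := rfl

lemma pvAscB_concat (xs : List Char) (c : Char) :
    pvAscB xs = true → (∀ p, xs.getLast? = some p → c.toNat = p.toNat + 1) →
    pvAscB (xs ++ [c]) = true := by
  induction xs with
  | nil => intro _ _; rfl
  | cons a t IH =>
    intro h hl
    rcases t with _|⟨b,t'⟩
    · have hac := hl a (by simp)
      show ((c.toNat == a.toNat + 1) && pvAscB [c]) = true
      simp [pvAscB, hac]
    · rw [pvAscB_cons_cons, Bool.and_eq_true] at h
      have hl' : ∀ p, (b :: t').getLast? = some p → c.toNat = p.toNat + 1 :=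
        fun p hp => hl p (by rw [List.getLast?_cons_cons]; exact hp)
      show ((b.toNat == a.toNat + 1) && pvAscB ((b :: t') ++ [c])) = true
      rw [IH h.2 hl', h.1]
      rfl

lemma pvAscB_append_right : ∀ (xs ys : List Char), pvAscB (xs ++ ys) = true → pvAscB ys = true := by
  intro xs
  induction xs with
  | nil => intro ys h; exact h
  | cons a t IH =>
    intro ys h
    apply IH
    rcases t with _|⟨b,t'⟩
    · rcases ys with _|⟨y,ys'⟩
      · rfl
      · have h' : ((y.toNat == a.toNat + 1) && pvAscB (y :: ys')) = true := h
        rw [Bool.and_eq_true] at h'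
        exact h'.2
    · have h' : ((b.toNat == a.toNat + 1) && pvAscB (b :: (t' ++ ys))) = true := h
      rw [Bool.and_eq_true] at h'
      exact h'.2

lemma pvAscB_append_left : ∀ (xs ys : List Char), pvAscB (xs ++ ys) = true → pvAscB xs = true := by
  intro xs
  induction xs with
  | nil => intro _ _; rfl
  | cons a t IH =>
    intro ys h
    rcases t with _|⟨b,t'⟩
    · rfl
    · have h' : ((b.toNat == a.toNat + 1) && pvAscB (b :: (t' ++ ys))) = true := h
      rw [Bool.and_eq_true] at h'
      show ((b.toNat == a.toNat + 1) && pvAscB (b :: t')) = true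
      rw [h'.1, IH ys h'.2]
      rfl

lemma pvAscB_infix {l l' : List Char} (hl : pvAscB l = true) (h : l' <:+: l) :
    pvAscB l' = true := by
  obtain ⟨pre, suf, rfl⟩ := h
  rw [List.append_assoc] at hl
  exact pvAscB_append_left l' suf (pvAscB_append_right pre _ hl)

def pvAsc (lo hi : Nat) (xs : List Char) : Prop :=
  pvAscB xs = true ∧ ∀ x ∈ xs, lo ≤ x.toNat ∧ x.toNat ≤ hi

def pvCtx (lo hi : Nat) (ctx : List Char) (prev : Option Char) : Prop :=
  pvAsc lo hi ctx ∧
    match prev with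
    | none => ctx = []
    | some p => if lo ≤ p.toNat ∧ p.toNat ≤ hi then ctx.getLast? = some p else ctx = []

lemma pvCtx_nil (lo hi : Nat) : pvCtx lo hi [] none :=
  ⟨⟨rfl, by intro x hx; cases hx⟩, rfl⟩

lemma pvCtx_single (lo hi : Nat) (c : Char) (h : lo ≤ c.toNat ∧ c.toNat ≤ hi) :
    pvCtx lo hi [c] (some c) := by
  refine ⟨⟨rfl, ?_⟩, ?_⟩
  · intro x hx
    rw [List.mem_singleton] at hx
    subst hx
    exact h
  · show if lo ≤ c.toNat ∧ c.toNat ≤ hi then List.getLast? [c] = some c else [c] = []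
    rw [if_pos h]
    simp

lemma pvCtx_none (lo hi : Nat) (c : Char) (h : ¬(lo ≤ c.toNat ∧ c.toNat ≤ hi)) :
    pvCtx lo hi [] (some c) := by
  refine ⟨⟨rfl, by intro x hx; cases hx⟩, ?_⟩
  show if lo ≤ c.toNat ∧ c.toNat ≤ hi then List.getLast? ([] : List Char) = some c
    else ([] : List Char) = []
  rw [if_neg h]

lemma pvCtx_concat (lo hi : Nat) (ctx : List Char) (p c : Char)
    (h : pvCtx lo hi ctx (some p)) (hp : lo ≤ p.toNat ∧ p.toNat ≤ hi)
    (hc : lo ≤ c.toNat ∧ c.toNat ≤ hi) (hstep : c.toNat = p.toNat + 1) :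
    pvCtx lo hi (ctx ++ [c]) (some c) := by
  have h2 : if lo ≤ p.toNat ∧ p.toNat ≤ hi then ctx.getLast? = some p else ctx = [] := h.2
  rw [if_pos hp] at h2
  refine ⟨⟨?_, ?_⟩, ?_⟩
  · refine pvAscB_concat ctx c h.1.1 ?_
    intro q hq
    rw [h2] at hq
    injection hq with hq
    rw [← hq]
    exact hstep
  · intro x hx
    rcases List.mem_append.mp hx with hx | hx
    · exact h.1.2 x hx
    · rw [List.mem_singleton] at hx
      subst hx
      exact hc
  · show if lo ≤ c.toNat ∧ c.toNat ≤ hi then (ctx ++ [c]).getLast? = some c else ctx ++ [c] = []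
    rw [if_pos hc, List.getLast?_concat]

lemma pvLen3 (l : List Char) (h : l.length = 3) : ∃ x y z, l = [x, y, z] := by
  rcases l with _|⟨x,_|⟨y,_|⟨z,_|⟨w,t⟩⟩⟩⟩
  · simp at h
  · simp at h
  · simp at h
  · exact ⟨x, y, z, rfl⟩
  · exfalso; simp only [List.length_cons] at h; omega

lemma pvLen2 (l : List Char) (h : l.length = 2) : ∃ x y, l = [x, y] := by
  rcases l with _|⟨x,_|⟨y,_|⟨z,t⟩⟩⟩
  · simp at h
  · simp at h
  · exact ⟨x, y, rfl⟩
  · exfalso; simp only [List.length_cons] at h; omega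

-- the main invariant of B's loop
lemma pvBLoop_eq (rest : List Char) :
    ∀ (ca cd : List Char) (prev : Option Char),
      pvCtx 97 122 ca prev → pvCtx 48 57 cd prev → ca.length ≤ 3 → cd.length ≤ 2 →
      pvBLoop rest ca.length cd.length prev
        = (pvScan4 (ca ++ PySem.Chars.lower rest) || pvScan3 (cd ++ PySem.Chars.lower rest)) := by
  induction rest with
  | nil =>
    intro ca cd prev _ _ hla hld
    have h4 : pvScan4 (ca ++ PySem.Chars.lower []) = false :=
      pvScan4_short _ (by simp [PySem.Chars.lower]; omega)
    have h3 : pvScan3 (cd ++ PySem.Chars.lower []) = false :=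
      pvScan3_short _ (by simp [PySem.Chars.lower]; omega)
    rw [h4, h3]
    rfl
  | cons ch t IH =>
    intro ca cd prev hA hD hla hld
    cases prev with
    | none =>
      have hca : ca = [] := hA.2
      have hcd : cd = [] := hD.2
      subst hca; subst hcd
      simp only [pvBLoop]
      rw [show PySem.Chars.lower (ch :: t)
        = PySem.Chars.lowerChar ch :: PySem.Chars.lower t from rfl]
      set c := PySem.Chars.lowerChar ch with hcdef
      set L := PySem.Chars.lower t with hLdef
      by_cases h1 : 'a' ≤ c ∧ c ≤ 'z'
      · have h1n : 97 ≤ c.toNat ∧ c.toNat ≤ 122 := (pvCondL c).mp h1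
        have hd1 : ¬('0' ≤ c ∧ c ≤ '9') := by rw [pvCondD]; omega
        have hdig : ¬(48 ≤ c.toNat ∧ c.toNat ≤ 57) := by omega
        rw [if_pos h1, if_neg hd1, if_neg (by omega : ¬((4:Nat) ≤ 1 ∨ (3:Nat) ≤ 0))]
        have hIH := IH [c] [] (some c) (pvCtx_single _ _ c h1n) (pvCtx_none _ _ c hdig)
          (by simp) (by simp)
        simp only [List.length_cons, List.length_nil] at hIH
        rw [hIH]
        simp only [List.singleton_append, List.nil_append]
        rw [pvScan3_skip1 c L hdig]
      · have h1n : ¬(97 ≤ c.toNat ∧ c.toNat ≤ 122) := fun hh => h1 ((pvCondL c).mpr hh)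
        rw [if_neg h1]
        by_cases hd1 : '0' ≤ c ∧ c ≤ '9'
        · have hdn : 48 ≤ c.toNat ∧ c.toNat ≤ 57 := (pvCondD c).mp hd1
          rw [if_pos hd1, if_neg (by omega : ¬((4:Nat) ≤ 0 ∨ (3:Nat) ≤ 1))]
          have hIH := IH [] [c] (some c) (pvCtx_none _ _ c (by omega))
            (pvCtx_single _ _ c hdn) (by simp) (by simp)
          simp only [List.length_cons, List.length_nil] at hIH
          rw [hIH]
          simp only [List.singleton_append, List.nil_append]
          rw [pvScan4_skip1 c L h1n]
        · have hdn : ¬(48 ≤ c.toNat ∧ c.toNat ≤ 57) := fun hh => hd1 ((pvCondD c).mpr hh)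
          rw [if_neg hd1, if_neg (by omega : ¬((4:Nat) ≤ 0 ∨ (3:Nat) ≤ 0))]
          have hIH := IH [] [] (some c) (pvCtx_none _ _ c h1n) (pvCtx_none _ _ c hdn)
            (by simp) (by simp)
          simp only [List.length_nil] at hIH
          rw [hIH]
          rw [show ([] : List Char) ++ c :: L = c :: L from rfl,
            pvScan4_skip1 c L h1n, pvScan3_skip1 c L hdn]
          rfl
    | some p =>
      simp only [pvBLoop]
      rw [show PySem.Chars.lower (ch :: t)
        = PySem.Chars.lowerChar ch :: PySem.Chars.lower t from rfl]
      set c := PySem.Chars.lowerChar ch with hcdef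
      set L := PySem.Chars.lower t with hLdef
      by_cases h1 : 'a' ≤ c ∧ c ≤ 'z'
      · -- c is a letter, hence not a digit
        have h1n : 97 ≤ c.toNat ∧ c.toNat ≤ 122 := (pvCondL c).mp h1
        have hd1 : ¬('0' ≤ c ∧ c ≤ '9') := by rw [pvCondD]; omega
        have hdig : ¬(48 ≤ c.toNat ∧ c.toNat ≤ 57) := by omega
        rw [if_pos h1, if_neg hd1]
        have hS3 : pvScan3 (cd ++ c :: L) = pvScan3 L := pvScan3_skip cd c L hdig hld
        by_cases h2 : ('a' ≤ p ∧ p ≤ 'z') ∧ c.toNat = p.toNat + 1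
        · -- run continues
          have hp' : 97 ≤ p.toNat ∧ p.toNat ≤ 122 := (pvCondL p).mp h2.1
          have hlast : ca.getLast? = some p := by
            have hh : if 97 ≤ p.toNat ∧ p.toNat ≤ 122 then ca.getLast? = some p
              else ca = [] := hA.2
            rw [if_pos hp'] at hh
            exact hh
          rw [if_pos h2]
          by_cases h3 : ca.length = 3
          · -- run reaches 4: both sides are true
            rw [if_pos (Or.inl (by omega))]
            obtain ⟨x, y, z, rfl⟩ := pvLen3 ca h3
            have hasc : ((y.toNat == x.toNat + 1) &&
                ((z.toNat == y.toNat + 1) && pvAscB [z])) = true := hA.1.1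
            rw [Bool.and_eq_true, Bool.and_eq_true] at hasc
            have hyx : y.toNat = x.toNat + 1 := by simpa using hasc.1
            have hzy : z.toNat = y.toNat + 1 := by simpa using hasc.2.1
            have hpz : z = p := by simpa using hlast
            have hzp : z.toNat = p.toNat := by rw [hpz]
            have hx : 97 ≤ x.toNat ∧ x.toNat ≤ 122 := hA.1.2 x (by simp)
            have hfire : pvG4 x y z c = true :=
              pvG4_true ⟨hx.1, hyx, hzy, by omega, by omega⟩
            rw [show ([x, y, z] ++ c :: L) = x :: y :: z :: c :: L from rfl,
              pvScan4_fire x y z c L hfire, Bool.true_or]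
          · -- run still short: recurse
            rw [if_neg (by omega : ¬(4 ≤ ca.length + 1 ∨ (3:Nat) ≤ 0))]
            have hIH := IH (ca ++ [c]) [] (some c)
              (pvCtx_concat _ _ ca p c hA hp' h1n h2.2)
              (pvCtx_none _ _ c hdig)
              (by simp only [List.length_append, List.length_cons, List.length_nil]; omega)
              (by simp)
            simp only [List.length_append, List.length_cons, List.length_nil] at hIH
            rw [show ca.length + 1 = ca.length + (0 + 1) by omega]
            rw [hIH]
            rw [show (ca ++ [c]) ++ L = ca ++ c :: L by rw [List.append_assoc]; rfl]
            rw [hS3]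
            rfl
        · -- run resets to 1
          have hbreak : ∀ q, ca.getLast? = some q → c.toNat ≠ q.toNat + 1 := by
            intro q hq
            have h2' : if 97 ≤ p.toNat ∧ p.toNat ≤ 122 then ca.getLast? = some p
              else ca = [] := hA.2
            by_cases hp' : 97 ≤ p.toNat ∧ p.toNat ≤ 122
            · rw [if_pos hp'] at h2'
              rw [h2'] at hq
              injection hq with hq
              intro hstep
              exact h2 ⟨(pvCondL p).mpr hp', by rw [← hq] at hstep; exact hstep⟩
            · rw [if_neg hp'] at h2'
              rw [h2'] at hq
              simp at hq
          rw [if_neg h2, if_neg (by omega : ¬((4:Nat) ≤ 1 ∨ (3:Nat) ≤ 0))]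
          have hIH := IH [c] [] (some c) (pvCtx_single _ _ c h1n) (pvCtx_none _ _ c hdig)
            (by simp) (by simp)
          simp only [List.length_cons, List.length_nil] at hIH
          rw [hIH]
          rw [pvScan4_break ca c L hbreak hla]
          rw [hS3]
          rfl
      · -- c is not a letter
        have h1n : ¬(97 ≤ c.toNat ∧ c.toNat ≤ 122) := fun hh => h1 ((pvCondL c).mpr hh)
        rw [if_neg h1]
        have hS4 : pvScan4 (ca ++ c :: L) = pvScan4 L := pvScan4_skip ca c L h1n hla
        by_cases hd1 : '0' ≤ c ∧ c ≤ '9'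
        · -- c is a digit
          have hdn : 48 ≤ c.toNat ∧ c.toNat ≤ 57 := (pvCondD c).mp hd1
          rw [if_pos hd1]
          by_cases h2 : ('0' ≤ p ∧ p ≤ '9') ∧ c.toNat = p.toNat + 1
          · have hp' : 48 ≤ p.toNat ∧ p.toNat ≤ 57 := (pvCondD p).mp h2.1
            have hlast : cd.getLast? = some p := by
              have hh : if 48 ≤ p.toNat ∧ p.toNat ≤ 57 then cd.getLast? = some p
                else cd = [] := hD.2
              rw [if_pos hp'] at hh
              exact hh
            rw [if_pos h2]
            by_cases h3 : cd.length = 2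
            · rw [if_pos (Or.inr (by omega))]
              obtain ⟨x, y, rfl⟩ := pvLen2 cd h3
              have hasc : ((y.toNat == x.toNat + 1) && pvAscB [y]) = true := hD.1.1
              rw [Bool.and_eq_true] at hasc
              have hyx : y.toNat = x.toNat + 1 := by simpa using hasc.1
              have hpy : y = p := by simpa using hlast
              have hyp : y.toNat = p.toNat := by rw [hpy]
              have hx : 48 ≤ x.toNat ∧ x.toNat ≤ 57 := hD.1.2 x (by simp)
              have hfire : pvG3 x y c = true :=
                pvG3_true ⟨hx.1, hyx, by omega, by omega⟩
              rw [show ([x, y] ++ c :: L) = x :: y :: c :: L from rfl,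
                pvScan3_fire x y c L hfire, Bool.or_true]
            · rw [if_neg (by omega : ¬((4:Nat) ≤ 0 ∨ 3 ≤ cd.length + 1))]
              have hIH := IH [] (cd ++ [c]) (some c)
                (pvCtx_none _ _ c (by omega))
                (pvCtx_concat _ _ cd p c hD hp' hdn h2.2)
                (by simp)
                (by simp only [List.length_append, List.length_cons, List.length_nil]; omega)
              simp only [List.length_append, List.length_cons, List.length_nil] at hIH
              rw [show cd.length + 1 = cd.length + (0 + 1) by omega]
              rw [hIH]
              rw [show (cd ++ [c]) ++ L = cd ++ c :: L by rw [List.append_assoc]; rfl]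
              rw [hS4]
              rfl
          · have hbreak : ∀ q, cd.getLast? = some q → c.toNat ≠ q.toNat + 1 := by
              intro q hq
              have h2' : if 48 ≤ p.toNat ∧ p.toNat ≤ 57 then cd.getLast? = some p
                else cd = [] := hD.2
              by_cases hp' : 48 ≤ p.toNat ∧ p.toNat ≤ 57
              · rw [if_pos hp'] at h2'
                rw [h2'] at hq
                injection hq with hq
                intro hstep
                exact h2 ⟨(pvCondD p).mpr hp', by rw [← hq] at hstep; exact hstep⟩
              · rw [if_neg hp'] at h2'
                rw [h2'] at hq
                simp at hq
            rw [if_neg h2, if_neg (by omega : ¬((4:Nat) ≤ 0 ∨ (3:Nat) ≤ 1))]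
            have hIH := IH [] [c] (some c) (pvCtx_none _ _ c (by omega))
              (pvCtx_single _ _ c hdn) (by simp) (by simp)
            simp only [List.length_cons, List.length_nil] at hIH
            rw [hIH]
            rw [pvScan3_break cd c L hbreak hld]
            rw [hS4]
            rfl
        · -- c is neither letter nor digit
          have hdn : ¬(48 ≤ c.toNat ∧ c.toNat ≤ 57) := fun hh => hd1 ((pvCondD c).mpr hh)
          rw [if_neg hd1, if_neg (by omega : ¬((4:Nat) ≤ 0 ∨ (3:Nat) ≤ 0))]
          have hIH := IH [] [] (some c) (pvCtx_none _ _ c h1n) (pvCtx_none _ _ c hdn)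
            (by simp) (by simp)
          simp only [List.length_nil] at hIH
          rw [hIH]
          rw [hS4, pvScan3_skip cd c L hdn hld]
          rfl

-- B computes the two window scans on the lowercased text
lemma pvB_eq (value : String) :
    has_sequential_pattern_py_alt value
      = (pvScan4 (PySem.Chars.lower value.toList) || pvScan3 (PySem.Chars.lower value.toList)) := by
  show pvBLoop value.toList 0 0 none = _
  have h := pvBLoop_eq value.toList [] [] none (pvCtx_nil 97 122) (pvCtx_nil 48 57)
    (by simp) (by simp)
  simpa using h

-- A-side: characterize the two loops of A by the same scans
lemma pvCons4 (l : List Char) (h : 4 ≤ l.length) : ∃ a b c d t, l = a :: b :: c :: d :: t := by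
  rcases l with _|⟨a,_|⟨b,_|⟨c,_|⟨d,t⟩⟩⟩⟩
  · simp at h
  · simp at h
  · simp at h
  · simp at h
  · exact ⟨a, b, c, d, t, rfl⟩

lemma pvCons3 (l : List Char) (h : 3 ≤ l.length) : ∃ a b c t, l = a :: b :: c :: t := by
  rcases l with _|⟨a,_|⟨b,_|⟨c,t⟩⟩⟩
  · simp at h
  · simp at h
  · simp at h
  · exact ⟨a, b, c, t, rfl⟩

lemma pvAlphaAsc : pvAscB pvAlphaS = true := by decide

lemma pvDigitAsc : pvAscB pvDigitS = true := by decide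

set_option maxRecDepth 4096 in
lemma pvIsIn_alpha (a b c d : Char) :
    PySem.Chars.isIn [a, b, c, d] pvAlphaS = pvG4 a b c d := by
  rw [Bool.eq_iff_iff, PySem.Chars.isIn_iff_infix]
  unfold pvG4
  rw [decide_eq_true_iff]
  constructor
  · intro h
    have hasc' : pvAscB [a, b, c, d] = true := pvAscB_infix pvAlphaAsc h
    have hasc : ((b.toNat == a.toNat + 1) && ((c.toNat == b.toNat + 1) &&
        ((d.toNat == c.toNat + 1) && pvAscB [d]))) = true := hasc'
    rw [Bool.and_eq_true, Bool.and_eq_true, Bool.and_eq_true] at hasc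
    have hmem : ∀ x ∈ pvAlphaS, 97 ≤ x.toNat ∧ x.toNat ≤ 122 := by
      intro x hx
      fin_cases hx <;> exact ⟨by decide, by decide⟩
    have ha := hmem a (h.subset (by simp))
    have hd := hmem d (h.subset (by simp))
    exact ⟨ha.1, by simpa using hasc.1, by simpa using hasc.2.1, by simpa using hasc.2.2.1, hd.2⟩
  · rintro ⟨h1, h2, h3, h4, h5⟩
    have ea : a = Char.ofNat a.toNat := (Char.ofNat_toNat a).symm
    have eb : b = Char.ofNat (a.toNat + 1) := by
      rw [← h2]; exact (Char.ofNat_toNat b).symm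
    have ec : c = Char.ofNat (a.toNat + 2) := by
      rw [show a.toNat + 2 = c.toNat by omega]; exact (Char.ofNat_toNat c).symm
    have ed : d = Char.ofNat (a.toNat + 3) := by
      rw [show a.toNat + 3 = d.toNat by omega]; exact (Char.ofNat_toNat d).symm
    have hub : a.toNat ≤ 119 := by omega
    rw [ea, eb, ec, ed]
    generalize hk : a.toNat = k at h1 hub
    interval_cases k <;> decide

set_option maxRecDepth 4096 in
lemma pvDig_eq (a b c : Char) :
    (PySem.Chars.strIsdigit [a, b, c] && PySem.Chars.isIn [a, b, c] pvDigitS) = pvG3 a b c := by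
  rw [Bool.eq_iff_iff, Bool.and_eq_true, PySem.Chars.isIn_iff_infix]
  unfold pvG3
  rw [decide_eq_true_iff]
  constructor
  · rintro ⟨-, h⟩
    have hasc' : pvAscB [a, b, c] = true := pvAscB_infix pvDigitAsc h
    have hasc : ((b.toNat == a.toNat + 1) && ((c.toNat == b.toNat + 1) && pvAscB [c])) = true :=
      hasc'
    rw [Bool.and_eq_true, Bool.and_eq_true] at hasc
    have hmem : ∀ x ∈ pvDigitS, 48 ≤ x.toNat ∧ x.toNat ≤ 57 := by
      intro x hx
      fin_cases hx <;> exact ⟨by decide, by decide⟩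
    have ha := hmem a (h.subset (by simp))
    have hc := hmem c (h.subset (by simp))
    exact ⟨ha.1, by simpa using hasc.1, by simpa using hasc.2.1, hc.2⟩
  · rintro ⟨h1, h2, h3, h4⟩
    constructor
    · show (!(List.isEmpty [a, b, c]) && List.all [a, b, c] PySem.Chars.isdigit) = true
      have hd : ∀ x : Char, 48 ≤ x.toNat → x.toNat ≤ 57 → PySem.Chars.isdigit x = true := by
        intro x hx1 hx2
        simp only [PySem.Chars.isdigit, Bool.and_eq_true, decide_eq_true_iff, pvChar_le_iff,
          show ('0' : Char).toNat = 48 from by decide, show ('9' : Char).toNat = 57 from by decide]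
        omega
      simp [hd a (by omega) (by omega), hd b (by omega) (by omega), hd c (by omega) (by omega)]
    · have ea : a = Char.ofNat a.toNat := (Char.ofNat_toNat a).symm
      have eb : b = Char.ofNat (a.toNat + 1) := by
        rw [← h2]; exact (Char.ofNat_toNat b).symm
      have ec : c = Char.ofNat (a.toNat + 2) := by
        rw [show a.toNat + 2 = c.toNat by omega]; exact (Char.ofNat_toNat c).symm
      have hub : a.toNat ≤ 55 := by omega
      rw [ea, eb, ec]
      generalize hk : a.toNat = k at h1 hub
      interval_cases k <;> decide

lemma pvLen_lower (l : List Char) : (PySem.Chars.lower l).length = l.length := by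
  simp [PySem.Chars.lower]

lemma pvAAlpha_eq (s : List Char) : pvAAlphaHit s = pvScan4 (PySem.Chars.lower s) := by
  by_cases h4 : 4 ≤ s.length
  · unfold pvAAlphaHit
    rw [if_pos h4, Bool.eq_iff_iff, List.any_eq_true, pvScan4_iff]
    constructor
    · rintro ⟨i, hi, hp⟩
      rw [PySem.List.mem_pyRange_one] at hi
      obtain ⟨hi0, hi1⟩ := hi
      obtain ⟨j, rfl⟩ : ∃ j : Nat, i = (j : Int) := ⟨i.toNat, (Int.toNat_of_nonneg hi0).symm⟩
      have hj4 : j + 4 ≤ s.length := by omega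
      rw [show ((j : Int) + 4) = ((j + 4 : Nat) : Int) by push_cast; ring,
        PySem.Chars.slice_eq_listSlice, PySem.List.slice_natCast,
        show j + 4 - j = 4 by omega] at hp
      obtain ⟨a, b, c, d, t, hdrop⟩ := pvCons4 (s.drop j) (by rw [List.length_drop]; omega)
      rw [hdrop, show List.take 4 (a :: b :: c :: d :: t) = [a, b, c, d] from rfl,
        show PySem.Chars.lower [a, b, c, d]
          = [PySem.Chars.lowerChar a, PySem.Chars.lowerChar b,
             PySem.Chars.lowerChar c, PySem.Chars.lowerChar d] from rfl,
        pvIsIn_alpha] at hp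
      refine ⟨j, _, _, _, _, PySem.Chars.lower t, ?_, hp⟩
      show List.drop j (PySem.Chars.lower s) = _
      rw [show PySem.Chars.lower s = List.map PySem.Chars.lowerChar s from rfl, ← List.map_drop,
        hdrop]
      rfl
    · rintro ⟨j, a, b, c, d, t, hdrop, hg⟩
      have hj4 : j + 4 ≤ s.length := by
        have hlen := congrArg List.length hdrop
        rw [List.length_drop, pvLen_lower] at hlen
        simp only [List.length_cons] at hlen
        omega
      refine ⟨(j : Int), ?_, ?_⟩
      · rw [PySem.List.mem_pyRange_one]
        exact ⟨Int.natCast_nonneg j, by omega⟩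
      · obtain ⟨a', b', c', d', t', hdrop'⟩ := pvCons4 (s.drop j) (by rw [List.length_drop]; omega)
        rw [show ((j : Int) + 4) = ((j + 4 : Nat) : Int) by push_cast; ring,
          PySem.Chars.slice_eq_listSlice, PySem.List.slice_natCast,
          show j + 4 - j = 4 by omega, hdrop',
          show List.take 4 (a' :: b' :: c' :: d' :: t') = [a', b', c', d'] from rfl,
          show PySem.Chars.lower [a', b', c', d']
            = [PySem.Chars.lowerChar a', PySem.Chars.lowerChar b',
               PySem.Chars.lowerChar c', PySem.Chars.lowerChar d'] from rfl,
          pvIsIn_alpha]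
        have hmap : PySem.Chars.lower (s.drop j) = a :: b :: c :: d :: t := by
          show List.map PySem.Chars.lowerChar (s.drop j) = _
          rw [List.map_drop]
          exact hdrop
        rw [hdrop'] at hmap
        have hmap' : PySem.Chars.lowerChar a' = a ∧ PySem.Chars.lowerChar b' = b ∧
            PySem.Chars.lowerChar c' = c ∧ PySem.Chars.lowerChar d' = d := by
          have hm2 : PySem.Chars.lowerChar a' :: PySem.Chars.lowerChar b' ::
              PySem.Chars.lowerChar c' :: PySem.Chars.lowerChar d' ::
              PySem.Chars.lower t' = a :: b :: c :: d :: t := hmap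
          simp only [List.cons.injEq] at hm2
          exact ⟨hm2.1, hm2.2.1, hm2.2.2.1, hm2.2.2.2.1⟩
        rw [hmap'.1, hmap'.2.1, hmap'.2.2.1, hmap'.2.2.2]
        exact hg
  · unfold pvAAlphaHit
    rw [if_neg h4]
    exact (pvScan4_short _ (by rw [pvLen_lower]; omega)).symm

lemma pvADigit_eq (s : List Char) : pvADigitHit s = pvScan3 s := by
  by_cases h3 : 3 ≤ s.length
  · unfold pvADigitHit
    rw [if_pos h3, Bool.eq_iff_iff, List.any_eq_true, pvScan3_iff]
    constructor
    · rintro ⟨i, hi, hp⟩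
      rw [PySem.List.mem_pyRange_one] at hi
      obtain ⟨hi0, hi1⟩ := hi
      obtain ⟨j, rfl⟩ : ∃ j : Nat, i = (j : Int) := ⟨i.toNat, (Int.toNat_of_nonneg hi0).symm⟩
      have hj3 : j + 3 ≤ s.length := by omega
      rw [show ((j : Int) + 3) = ((j + 3 : Nat) : Int) by push_cast; ring,
        PySem.Chars.slice_eq_listSlice, PySem.List.slice_natCast,
        show j + 3 - j = 3 by omega] at hp
      obtain ⟨a, b, c, t, hdrop⟩ := pvCons3 (s.drop j) (by rw [List.length_drop]; omega)
      rw [hdrop, show List.take 3 (a :: b :: c :: t) = [a, b, c] from rfl, pvDig_eq] at hp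
      exact ⟨j, a, b, c, t, hdrop, hp⟩
    · rintro ⟨j, a, b, c, t, hdrop, hg⟩
      have hj3 : j + 3 ≤ s.length := by
        have hlen := congrArg List.length hdrop
        rw [List.length_drop] at hlen
        simp only [List.length_cons] at hlen
        omega
      refine ⟨(j : Int), ?_, ?_⟩
      · rw [PySem.List.mem_pyRange_one]
        exact ⟨Int.natCast_nonneg j, by omega⟩
      · rw [show ((j : Int) + 3) = ((j + 3 : Nat) : Int) by push_cast; ring,
          PySem.Chars.slice_eq_listSlice, PySem.List.slice_natCast,
          show j + 3 - j = 3 by omega, hdrop,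
          show List.take 3 (a :: b :: c :: t) = [a, b, c] from rfl, pvDig_eq]
        exact hg
  · unfold pvADigitHit
    rw [if_neg h3]
    exact (pvScan3_short _ (by omega)).symm

-- lowercasing does not change the digit windows
lemma pvG3_lower (a b c : Char) :
    pvG3 (PySem.Chars.lowerChar a) (PySem.Chars.lowerChar b) (PySem.Chars.lowerChar c)
      = pvG3 a b c := by
  unfold pvG3
  rw [decide_eq_decide, pvLower_toNat, pvLower_toNat, pvLower_toNat]
  split_ifs <;> omega

lemma pvScan3_lower (l : List Char) : pvScan3 (PySem.Chars.lower l) = pvScan3 l := by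
  induction l with
  | nil => rfl
  | cons a t IH =>
    rw [show PySem.Chars.lower (a :: t) = PySem.Chars.lowerChar a :: PySem.Chars.lower t from rfl]
    show (pvWin3 (PySem.Chars.lower t) (PySem.Chars.lowerChar a) || pvScan3 (PySem.Chars.lower t))
      = (pvWin3 t a || pvScan3 t)
    rw [IH]
    congr 1
    rcases t with _|⟨b,_|⟨c,t'⟩⟩
    · rfl
    · rfl
    · show pvG3 (PySem.Chars.lowerChar a) (PySem.Chars.lowerChar b) (PySem.Chars.lowerChar c)
        = pvG3 a b c
      exact pvG3_lower a b c

lemma pvA_eq (value : String) :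
    has_sequential_pattern_py value
      = (pvScan4 (PySem.Chars.lower value.toList) || pvScan3 value.toList) := by
  unfold has_sequential_pattern_py
  rw [pvAAlpha_eq, pvADigit_eq]
  cases pvScan4 (PySem.Chars.lower value.toList) <;> simp

-- ===== VERDICT (by name: the statement is the Claim_ definition above) =====
theorem has_sequential_pattern_py_spec : Claim_equal_has_sequential_pattern_py := by
  unfold Claim_equal_has_sequential_pattern_py
  intro value _
  unfold Spec_has_sequential_pattern_py
  rw [pvA_eq, pvB_eq, pvScan3_lower]
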